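-- pv_equiv track=rewrite | github.com/Metel-Sky/hillel-python | Lesson_012/HomeWork_12.py | create_category_brand_index
-- ===== SOURCE A (Python) =====
-- def create_category_brand_index(rows):
--     """Функція, що створює словник індексу за категоріями та брендами"""
--     index = {'categories': {}, 'brands': {}}
--     for row in rows:
--         # Додаємо до словника index
--         category = row['category']
--         brand = row['brand']
--         if category not in index['categories']:
--             index['categories'][category] = []
--         index['categories'][category].append(row)
--         if brand not in index['brands']:
--             index['brands'][brand] = []
--         index['brands'][brand].append(row)
--     return index
-- ===== SOURCE B (Python) =====
-- def create_category_brand_index(rows):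
--     """Two-pass grouping: collect distinct keys in first-seen order, then build
--     each group by filtering the rows for that key (instead of one-pass bucketing)."""
--     def group_by(field):
--         keys = []
--         for row in rows:
--             k = row[field]
--             if k not in keys:
--                 keys.append(k)
--         return {k: [row for row in rows if row[field] == k] for k in keys}
--     return {'categories': group_by('category'), 'brands': group_by('brand')}
-- ===== Notes on version B (the rewrite author's own statement) =====
-- stated objective: alternative
-- what changed: A builds both group dicts in one pass by bucketing each row into index['categories']/index['brands']; B makes two passes per field: it first collects the distinct key values in first-seen order, then builds each group as a filter of the rows for that key.
import Mathlib
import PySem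

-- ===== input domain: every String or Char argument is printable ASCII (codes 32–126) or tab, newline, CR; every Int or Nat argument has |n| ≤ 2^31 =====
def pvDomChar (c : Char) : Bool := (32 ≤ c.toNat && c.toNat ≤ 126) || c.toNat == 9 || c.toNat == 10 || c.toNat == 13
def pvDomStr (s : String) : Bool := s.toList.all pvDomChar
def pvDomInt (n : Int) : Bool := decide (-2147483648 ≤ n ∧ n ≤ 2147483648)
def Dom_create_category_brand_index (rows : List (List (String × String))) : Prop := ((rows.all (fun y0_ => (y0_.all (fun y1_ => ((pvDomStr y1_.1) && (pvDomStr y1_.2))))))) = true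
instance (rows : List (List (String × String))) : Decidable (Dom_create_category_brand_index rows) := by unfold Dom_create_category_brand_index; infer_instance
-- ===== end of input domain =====

-- B replaces A's one-pass dict bucketing by a two-pass scheme (distinct keys in
-- first-seen order, then a per-key filter of the rows); objective: alternative decomposition.

-- ===== PORT A =====
-- row['category'] is a first-match dict lookup; the "" default is only reached
-- outside Pre_ (Python raises KeyError there).
def pvLookup (row : List (String × String)) (k : String) : String :=
  ((PySem.Dict.mk row).get? k).getD ""

def create_category_brand_index (rows : List (List (String × String))) : List (String × List (String × List (List (String × String)))) :=
  -- index = {'categories': {}, 'brands': {}}: the two inner dicts, carried as a pair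
  let st := rows.foldl (fun (st : PySem.Dict String (List (List (String × String))) × PySem.Dict String (List (List (String × String)))) row =>
    (let category := pvLookup row "category"
     let cats := if st.1.contains category then st.1 else st.1.insert category []
     cats.insert category (cats.getD category [] ++ [row]),
     let brand := pvLookup row "brand"
     let brs := if st.2.contains brand then st.2 else st.2.insert brand []
     brs.insert brand (brs.getD brand [] ++ [row])))
    (PySem.Dict.empty, PySem.Dict.empty)
  [("categories", st.1.items), ("brands", st.2.items)]

-- ===== PORT B =====
def pvKeysOf (rows : List (List (String × String))) (field : String) : List String :=
  rows.foldl (fun ks row => PySem.Set.add ks (pvLookup row field)) []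

def pvGroupBy (rows : List (List (String × String))) (field : String) : List (String × List (List (String × String))) :=
  (pvKeysOf rows field).map (fun k => (k, rows.filter (fun row => pvLookup row field == k)))

def create_category_brand_index_alt (rows : List (List (String × String))) : List (String × List (String × List (List (String × String)))) :=
  [("categories", pvGroupBy rows "category"), ("brands", pvGroupBy rows "brand")]

-- ===== PRECONDITION & SPEC =====
-- Pre_: every row carries both keys 'category' and 'brand'; on any other input the
-- Python A raises KeyError (and so does B).
def Pre_create_category_brand_index (rows : List (List (String × String))) : Prop :=
  (rows.all (fun row => (PySem.Dict.mk row).contains "category" && (PySem.Dict.mk row).contains "brand")) = true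
instance (rows : List (List (String × String))) : Decidable (Pre_create_category_brand_index rows) := by unfold Pre_create_category_brand_index; infer_instance

def pvWitness_create_category_brand_index : (List (List (String × String))) :=
  [[("category", "fruit"), ("brand", "acme"), ("id", "1")], [("category", "veg"), ("brand", "acme"), ("id", "2")]]

def Spec_create_category_brand_index (rows : List (List (String × String))) (out : List (String × List (String × List (List (String × String))))) : Prop := out = create_category_brand_index_alt rows
instance (rows : List (List (String × String))) (out : List (String × List (String × List (List (String × String))))) : Decidable (Spec_create_category_brand_index rows out) := by unfold Spec_create_category_brand_index; exact instDecidableEqOfLawfulBEq out _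

-- ===== CLAIM (what is proved, stated in full; the proofs are below) =====
def Claim_equal_create_category_brand_index : Prop := ∀ (rows : List (List (String × String))), Dom_create_category_brand_index rows → Pre_create_category_brand_index rows → Spec_create_category_brand_index rows (create_category_brand_index rows)

-- ===== LEMMAS AND PROOFS =====

-- A's "ensure the key, then append" is a single modify with default [].
theorem pvStep_eq_modify (d : PySem.Dict String (List (List (String × String)))) (k : String) (r : List (String × String)) :
    (let d' := if d.contains k then d else d.insert k []
     d'.insert k (d'.getD k [] ++ [r])) = d.modify k [] (· ++ [r]) := by
  by_cases h : d.contains k = true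
  · simp [h, PySem.Dict.modify, PySem.Dict.getD_eq_get?_getD]
  · have hg : d.getD k [] = [] := PySem.Dict.getD_of_not_contains d [] (by simpa using h)
    simp [h, PySem.Dict.modify, PySem.Dict.getD_insert_self, PySem.Dict.insert_insert_self, hg]

-- the bucketing fold's items are exactly B's keys-then-filter groups
theorem pvItems_eq_group (rows : List (List (String × String))) (field : String) :
    (rows.foldl (fun d row => d.modify (pvLookup row field) [] (· ++ [row])) PySem.Dict.empty).items
      = pvGroupBy rows field := by
  have hfold : rows.foldl (fun d row => d.modify (pvLookup row field) [] (· ++ [row])) PySem.Dict.empty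
      = (rows.map (fun r => (pvLookup r field, r))).foldl (fun d p => d.modify p.1 [] (· ++ [p.2])) PySem.Dict.empty := by
    rw [List.foldl_map]
  have hnodup : (rows.foldl (fun d row => d.modify (pvLookup row field) [] (· ++ [row])) PySem.Dict.empty).keys.Nodup := by
    apply PySem.Dict.nodup_keys_foldl_modify_key rows (fun r => pvLookup r field) [] (fun _ r => (· ++ [r]))
    simp
  rw [PySem.Dict.items_eq_map_keys _ hnodup []]
  have hkeys : (rows.foldl (fun d row => d.modify (pvLookup row field) [] (· ++ [row])) PySem.Dict.empty).keys
      = pvKeysOf rows field := by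
    rw [PySem.Dict.keys_foldl_modify_key rows (fun r => pvLookup r field) [] (fun _ r => (· ++ [r]))]
    simp [pvKeysOf, ← PySem.Set.update_map_eq_foldl_add]
  rw [hkeys]
  unfold pvGroupBy
  apply List.map_congr_left
  intro k _
  rw [hfold, PySem.Dict.getD_foldl_modify_append]
  simp [List.filter_map, Function.comp_def]

-- ===== VERDICT (by name: the statement is the Claim_ definition above) =====
theorem create_category_brand_index_spec : Claim_equal_create_category_brand_index := by
  intro rows _ _
  unfold Spec_create_category_brand_index create_category_brand_index create_category_brand_index_alt
  have hstep : (fun (st : PySem.Dict String (List (List (String × String))) × PySem.Dict String (List (List (String × String)))) (row : List (String × String)) =>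
      ((let category := pvLookup row "category"
        let cats := if st.1.contains category then st.1 else st.1.insert category []
        cats.insert category (cats.getD category [] ++ [row])),
       (let brand := pvLookup row "brand"
        let brs := if st.2.contains brand then st.2 else st.2.insert brand []
        brs.insert brand (brs.getD brand [] ++ [row]))))
      = fun st row => (st.1.modify (pvLookup row "category") [] (· ++ [row]),
                       st.2.modify (pvLookup row "brand") [] (· ++ [row])) := by
    funext st row
    exact congrArg₂ Prod.mk (pvStep_eq_modify st.1 (pvLookup row "category") row)
      (pvStep_eq_modify st.2 (pvLookup row "brand") row)
  rw [hstep]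
  dsimp only
  have hsplit := PySem.List.foldl_prod_mk
    (fun (d : PySem.Dict String (List (List (String × String)))) (row : List (String × String)) => d.modify (pvLookup row "category") [] (· ++ [row]))
    (fun (d : PySem.Dict String (List (List (String × String)))) (row : List (String × String)) => d.modify (pvLookup row "brand") [] (· ++ [row]))
    rows PySem.Dict.empty PySem.Dict.empty
  rw [hsplit]
  rw [pvItems_eq_group rows "category", pvItems_eq_group rows "brand"]
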